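-- pv_equiv track=rewrite | github.com/ilhamVode/practice | src/mapping.py | build_major_scale
-- ===== SOURCE A (Python) =====
-- def build_major_scale(midi_low=60, midi_high=84):
--     """
--     Возвращает список MIDI-нотов, входящих в C-мажорную шкалу от midi_low до midi_high.
--     По умолчанию C4(60) .. C6(84).
--     """
--     # ступени мажора: 0,2,4,5,7,9,11
--     intervals = [0, 2, 4, 5, 7, 9, 11]
--     notes = []
--     base = 12 * (midi_low // 12)  # ближайший базовый октавный шаг
--     # начинаем с C (но мы ориентируемся от midi_low)
--     for m in range(midi_low, midi_high + 1):
--         octave = (m % 12)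
--         # найдем ближайшую ступень мажора по модулю 12 относительно C
--         if octave in intervals:
--             notes.append(m)
--     # Для гарантии — если notes пуст, построим простую последовательность
--     if not notes:
--         notes = list(range(midi_low, midi_high + 1))
--     return notes
-- ===== SOURCE B (Python) =====
-- # Skip-walk: start at the first scale note >= midi_low and jump straight to the
-- # next scale note via a successor-step table, never testing membership.
-- STEP = [2, 1, 2, 1, 1, 2, 1, 2, 1, 2, 1, 1]   # distance from residue r to the next scale residue
-- UP = [0, 2, 2, 4, 4, 5, 7, 7, 9, 9, 11, 11]   # smallest scale residue >= r
--
-- def build_major_scale(midi_low=60, midi_high=84):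
--     r = midi_low % 12
--     n = midi_low - r + UP[r]
--     notes = []
--     while n <= midi_high:
--         notes.append(n)
--         n += STEP[n % 12]
--     if not notes:
--         notes = list(range(midi_low, midi_high + 1))
--     return notes
-- ===== Notes on version B (the rewrite author's own statement) =====
-- stated objective: faster
-- what changed: Instead of scanning every MIDI value in [midi_low, midi_high] and testing m % 12 against an interval list, B starts at the first scale note >= midi_low (via a round-up table) and skip-walks from each scale note directly to the next using a per-residue successor-step table, visiting only the notes it emits; the empty-result fallback is identical.
import Mathlib
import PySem

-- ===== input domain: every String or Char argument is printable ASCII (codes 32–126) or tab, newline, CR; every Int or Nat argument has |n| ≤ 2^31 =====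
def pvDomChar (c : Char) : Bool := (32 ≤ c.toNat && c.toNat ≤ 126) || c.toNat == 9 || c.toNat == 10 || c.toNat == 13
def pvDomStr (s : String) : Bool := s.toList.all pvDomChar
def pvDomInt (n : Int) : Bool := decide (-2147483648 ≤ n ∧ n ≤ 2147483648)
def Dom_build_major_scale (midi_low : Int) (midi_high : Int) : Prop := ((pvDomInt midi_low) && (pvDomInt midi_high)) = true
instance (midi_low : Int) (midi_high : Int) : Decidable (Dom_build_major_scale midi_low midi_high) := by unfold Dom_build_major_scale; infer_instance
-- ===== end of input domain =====

-- B replaces A's scan-and-test over every MIDI value by a skip-walk that jumps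
-- from one scale note directly to the next via a successor-step table.

-- ===== PORT A =====
def build_major_scale (midi_low : Int) (midi_high : Int) : List Int :=
  let intervals : List Int := [0, 2, 4, 5, 7, 9, 11]
  let _base : Int := 12 * (PySem.Int.floordiv midi_low 12)  -- computed but unused in A
  let notes : List Int :=
    (PySem.List.pyRange midi_low (midi_high + 1) 1).foldl
      (fun acc m =>
        if intervals.contains (PySem.Int.mod m 12) then acc ++ [m] else acc) []
  if notes = [] then PySem.List.pyRange midi_low (midi_high + 1) 1 else notes

-- ===== PORT B =====
-- STEP[r] / UP[r]: table indexing; the walk only reads indices r = n % 12 ∈ [0,12),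
-- always in range, so getD with a dummy default is exact for Python's STEP[r] / UP[r].
def pvSTEP (r : Int) : Int := ([2, 1, 2, 1, 1, 2, 1, 2, 1, 2, 1, 1] : List Int).getD r.toNat 1
def pvUP (r : Int) : Int := ([0, 2, 2, 4, 4, 5, 7, 7, 9, 9, 11, 11] : List Int).getD r.toNat 0

theorem pvSTEP_pos (r : Int) : 1 ≤ pvSTEP r := by
  unfold pvSTEP
  rcases h : (([2, 1, 2, 1, 1, 2, 1, 2, 1, 2, 1, 1] : List Int)[r.toNat]?) with _ | v
  · simp [List.getD, h]
  · have hv := List.mem_of_getElem? h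
    simp only [List.getD, h, Option.getD_some]
    fin_cases hv <;> norm_num

-- the while-loop of B: emit n, then jump by STEP[n % 12]
def pvWalk (hi : Int) (n : Int) : List Int :=
  if _h : n ≤ hi then n :: pvWalk hi (n + pvSTEP (PySem.Int.mod n 12)) else []
termination_by (hi + 1 - n).toNat
decreasing_by
  have := pvSTEP_pos (PySem.Int.mod n 12)
  omega

def build_major_scale_alt (midi_low : Int) (midi_high : Int) : List Int :=
  let r : Int := PySem.Int.mod midi_low 12
  let notes : List Int := pvWalk midi_high (midi_low - r + pvUP r)
  if notes = [] then PySem.List.pyRange midi_low (midi_high + 1) 1 else notes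

-- ===== PRECONDITION & SPEC =====
def Spec_build_major_scale (midi_low : Int) (midi_high : Int) (out : List Int) : Prop := out = build_major_scale_alt midi_low midi_high
instance (midi_low : Int) (midi_high : Int) (out : List Int) : Decidable (Spec_build_major_scale midi_low midi_high out) := by unfold Spec_build_major_scale; infer_instance

-- ===== CLAIM (what is proved, stated in full; the proofs are below) =====
def Claim_equal_build_major_scale : Prop := ∀ (midi_low : Int) (midi_high : Int), Dom_build_major_scale midi_low midi_high → Spec_build_major_scale midi_low midi_high (build_major_scale midi_low midi_high)

-- ===== LEMMAS AND PROOFS =====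

-- A's scale-membership test as a Bool predicate
def pvP (m : Int) : Bool := ([0, 2, 4, 5, 7, 9, 11] : List Int).contains (PySem.Int.mod m 12)

theorem pvP_iff (m : Int) : pvP m = true ↔
    (m % 12 = 0 ∨ m % 12 = 2 ∨ m % 12 = 4 ∨ m % 12 = 5 ∨ m % 12 = 7 ∨ m % 12 = 9 ∨ m % 12 = 11) := by
  unfold pvP
  rw [PySem.Int.mod_eq_emod_of_pos (by norm_num : (0:Int) < 12)]
  rw [List.contains_iff_mem]
  simp [List.mem_cons]

-- table evaluation facts
theorem pvSTEP_0 : pvSTEP 0 = 2 := by decide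
theorem pvSTEP_2 : pvSTEP 2 = 2 := by decide
theorem pvSTEP_4 : pvSTEP 4 = 1 := by decide
theorem pvSTEP_5 : pvSTEP 5 = 2 := by decide
theorem pvSTEP_7 : pvSTEP 7 = 2 := by decide
theorem pvSTEP_9 : pvSTEP 9 = 2 := by decide
theorem pvSTEP_11 : pvSTEP 11 = 1 := by decide
theorem pvUP_0 : pvUP 0 = 0 := by decide
theorem pvUP_1 : pvUP 1 = 2 := by decide
theorem pvUP_2 : pvUP 2 = 2 := by decide
theorem pvUP_3 : pvUP 3 = 4 := by decide
theorem pvUP_4 : pvUP 4 = 4 := by decide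
theorem pvUP_5 : pvUP 5 = 5 := by decide
theorem pvUP_6 : pvUP 6 = 7 := by decide
theorem pvUP_7 : pvUP 7 = 7 := by decide
theorem pvUP_8 : pvUP 8 = 9 := by decide
theorem pvUP_9 : pvUP 9 = 9 := by decide
theorem pvUP_10 : pvUP 10 = 11 := by decide
theorem pvUP_11 : pvUP 11 = 11 := by decide

-- at a scale note n, the jump lands on the next scale note, skipping only non-scale values
theorem pvStep_facts (n : Int) (h : pvP n = true) :
    pvP (n + pvSTEP (PySem.Int.mod n 12)) = true ∧
    (∀ m, n < m → m < n + pvSTEP (PySem.Int.mod n 12) → pvP m = false) ∧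
    1 ≤ pvSTEP (PySem.Int.mod n 12) := by
  rw [pvP_iff] at h
  have hmod : PySem.Int.mod n 12 = n % 12 :=
    PySem.Int.mod_eq_emod_of_pos (by norm_num : (0:Int) < 12)
  rcases h with h | h | h | h | h | h | h <;>
    · rw [hmod, h]
      simp only [pvSTEP_0, pvSTEP_2, pvSTEP_4, pvSTEP_5, pvSTEP_7, pvSTEP_9, pvSTEP_11]
      refine ⟨?_, fun m h1 h2 => ?_, by norm_num⟩
      · rw [pvP_iff]; omega
      · rw [show pvP m = false ↔ ¬ pvP m = true by simp, pvP_iff]; omega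

-- the walk from a scale note n equals A's filter over [lo, hi+1), given that
-- [lo, n) holds no scale note
theorem pvWalk_eq_filter (hi : Int) :
    ∀ (fuel : Nat) (n lo : Int), pvP n = true → lo ≤ n →
      (∀ m, lo ≤ m → m < n → pvP m = false) → hi + 1 ≤ n + fuel →
      pvWalk hi n = (PySem.List.pyRange lo (hi + 1) 1).filter pvP := by
  intro fuel
  induction fuel with
  | zero =>
    intro n lo hp hln hgap hfuel
    rw [pvWalk, dif_neg (by omega)]
    symm
    apply List.filter_eq_nil_iff.mpr
    intro m hm
    rw [PySem.List.mem_pyRange_one] at hm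
    simp [hgap m hm.1 (by omega)]
  | succ fuel ih =>
    intro n lo hp hln hgap hfuel
    by_cases hle : n ≤ hi
    · obtain ⟨hnext, hskip, hstep⟩ := pvStep_facts n hp
      rw [pvWalk, dif_pos hle]
      rw [ih (n + pvSTEP (PySem.Int.mod n 12)) (n + 1) hnext (by omega)
        (fun m h1 h2 => hskip m (by omega) h2) (by omega)]
      have hsplit : PySem.List.pyRange lo (hi + 1) 1
          = PySem.List.pyRange lo n 1 ++ PySem.List.pyRange n (hi + 1) 1 := by
        rw [PySem.List.pyRange_one, PySem.List.pyRange_one, PySem.List.pyRange_one]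
        have : (hi + 1 - lo).toNat = (n - lo).toNat + (hi + 1 - n).toNat := by omega
        rw [this, List.range_add, List.map_append, List.map_map]
        congr 1
        apply List.map_congr_left; intro k _; simp only [Function.comp_apply]; omega
      rw [hsplit, List.filter_append]
      have hnil : (PySem.List.pyRange lo n 1).filter pvP = [] := by
        apply List.filter_eq_nil_iff.mpr
        intro m hm
        rw [PySem.List.mem_pyRange_one] at hm
        simp [hgap m hm.1 hm.2]
      rw [hnil, List.nil_append, PySem.List.pyRange_one_cons (by omega : n < hi + 1), List.filter_cons_of_pos hp]
    · rw [pvWalk, dif_neg hle]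
      symm
      apply List.filter_eq_nil_iff.mpr
      intro m hm
      rw [PySem.List.mem_pyRange_one] at hm
      rcases lt_or_ge m n with hmn | hmn
      · simp [hgap m hm.1 hmn]
      · omega

-- the start of the walk: first = lo - (lo % 12) + UP[lo % 12] is the first scale note ≥ lo
theorem pvStart_facts (lo : Int) :
    pvP (lo - PySem.Int.mod lo 12 + pvUP (PySem.Int.mod lo 12)) = true ∧
    lo ≤ lo - PySem.Int.mod lo 12 + pvUP (PySem.Int.mod lo 12) ∧
    (∀ m, lo ≤ m → m < lo - PySem.Int.mod lo 12 + pvUP (PySem.Int.mod lo 12) → pvP m = false) := by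
  have hmod : PySem.Int.mod lo 12 = lo % 12 :=
    PySem.Int.mod_eq_emod_of_pos (by norm_num : (0:Int) < 12)
  rw [hmod]
  have hb : 0 ≤ lo % 12 ∧ lo % 12 < 12 :=
    ⟨Int.emod_nonneg lo (by norm_num), Int.emod_lt_of_pos lo (by norm_num)⟩
  have hc : lo % 12 = 0 ∨ lo % 12 = 1 ∨ lo % 12 = 2 ∨ lo % 12 = 3 ∨ lo % 12 = 4 ∨ lo % 12 = 5 ∨
      lo % 12 = 6 ∨ lo % 12 = 7 ∨ lo % 12 = 8 ∨ lo % 12 = 9 ∨ lo % 12 = 10 ∨ lo % 12 = 11 := by omega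
  rcases hc with h | h | h | h | h | h | h | h | h | h | h | h <;>
    · rw [h]
      simp only [pvUP_0, pvUP_1, pvUP_2, pvUP_3, pvUP_4, pvUP_5, pvUP_6, pvUP_7, pvUP_8, pvUP_9,
        pvUP_10, pvUP_11]
      refine ⟨?_, by omega, fun m h1 h2 => ?_⟩
      · rw [pvP_iff]; omega
      · rw [show pvP m = false ↔ ¬ pvP m = true by simp, pvP_iff]; omega

-- the two note lists coincide
theorem pvNotes_eq (lo hi : Int) :
    pvWalk hi (lo - PySem.Int.mod lo 12 + pvUP (PySem.Int.mod lo 12))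
      = (PySem.List.pyRange lo (hi + 1) 1).foldl
          (fun acc m =>
            if ([0, 2, 4, 5, 7, 9, 11] : List Int).contains (PySem.Int.mod m 12) then acc ++ [m]
            else acc) [] := by
  have hA : (PySem.List.pyRange lo (hi + 1) 1).foldl
      (fun acc m =>
        if ([0, 2, 4, 5, 7, 9, 11] : List Int).contains (PySem.Int.mod m 12) then acc ++ [m]
        else acc) []
      = (PySem.List.pyRange lo (hi + 1) 1).filter pvP := by
    unfold pvP
    rw [PySem.List.foldl_append_if _ (fun m => m)]
    simp
  rw [hA]
  obtain ⟨hp, hge, hgap⟩ := pvStart_facts lo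
  exact pvWalk_eq_filter hi
    (hi + 1 - (lo - PySem.Int.mod lo 12 + pvUP (PySem.Int.mod lo 12))).toNat _ lo hp hge hgap (by omega)

-- ===== VERDICT (by name: the statement is the Claim_ definition above) =====
theorem build_major_scale_spec : Claim_equal_build_major_scale := by
  intro lo hi _
  unfold Spec_build_major_scale
  simp only [build_major_scale, build_major_scale_alt]
  rw [pvNotes_eq lo hi]
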